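-- pv_equiv track=rewrite | github.com/multivac61/aoc | year/2021.py | apply_rotation
-- ===== SOURCE A (Python) =====
-- def apply_rotation(point, rotation):
--     """Apply rotation to a point."""
--     x, y, z = point
--     facing, roll = rotation
--
--     # First, face the correct direction
--     if facing == "x":
--         px, py, pz = x, y, z
--     elif facing == "-x":
--         px, py, pz = -x, -y, z
--     elif facing == "y":
--         px, py, pz = y, -x, z
--     elif facing == "-y":
--         px, py, pz = -y, x, z
--     elif facing == "z":
--         px, py, pz = z, y, -x
--     elif facing == "-z":
--         px, py, pz = -z, y, x
--
--     # Then apply roll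
--     for _ in range(roll):
--         px, py, pz = px, -pz, py
--
--     return px, py, pz
-- ===== SOURCE B (Python) =====
-- # Table-driven linear algebra: each facing is a 3x3 signed-permutation matrix,
-- # the roll step is a fixed matrix applied (roll mod 4) times (the step has period 4;
-- # negative roll means no roll, as range() does).
-- FACING = {
--     "x":  ((1, 0, 0), (0, 1, 0), (0, 0, 1)),
--     "-x": ((-1, 0, 0), (0, -1, 0), (0, 0, 1)),
--     "y":  ((0, 1, 0), (-1, 0, 0), (0, 0, 1)),
--     "-y": ((0, -1, 0), (1, 0, 0), (0, 0, 1)),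
--     "z":  ((0, 0, 1), (0, 1, 0), (-1, 0, 0)),
--     "-z": ((0, 0, -1), (0, 1, 0), (1, 0, 0)),
-- }
--
-- ROLL = ((1, 0, 0), (0, 0, -1), (0, 1, 0))
--
--
-- def _matvec(m, v):
--     return tuple(sum(m[i][j] * v[j] for j in range(3)) for i in range(3))
--
--
-- def apply_rotation(point, rotation):
--     """Apply rotation to a point."""
--     facing, roll = rotation
--     v = _matvec(FACING[facing], point)
--     for _ in range(max(roll, 0) % 4):
--         v = _matvec(ROLL, v)
--     return v
-- ===== Notes on version B (the rewrite author's own statement) =====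
-- stated objective: alternative
-- what changed: Replaces the hardcoded per-facing coordinate formulas and the roll-times loop by table-driven integer matrix-vector multiplication: a facing matrix looked up in a dict, and a fixed roll matrix applied (max(roll,0) mod 4) times, exploiting the period-4 roll step.
import Mathlib
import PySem

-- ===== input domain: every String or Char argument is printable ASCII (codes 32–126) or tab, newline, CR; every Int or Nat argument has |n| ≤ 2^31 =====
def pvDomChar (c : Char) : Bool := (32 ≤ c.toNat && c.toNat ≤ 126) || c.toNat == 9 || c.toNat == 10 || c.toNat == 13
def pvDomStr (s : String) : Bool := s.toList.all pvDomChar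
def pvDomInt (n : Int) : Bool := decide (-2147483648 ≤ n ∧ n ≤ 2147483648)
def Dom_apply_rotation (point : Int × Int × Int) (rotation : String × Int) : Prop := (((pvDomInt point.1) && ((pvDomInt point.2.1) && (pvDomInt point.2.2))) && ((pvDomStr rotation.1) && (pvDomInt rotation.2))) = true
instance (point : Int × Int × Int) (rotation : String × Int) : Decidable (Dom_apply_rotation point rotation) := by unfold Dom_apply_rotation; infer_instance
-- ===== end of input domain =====

-- B replaces A's hardcoded per-facing formulas and roll-times loop by a facing-matrix
-- table and (max(roll,0) mod 4) applications of a fixed roll matrix (same return values).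

-- ===== PORT A =====
-- for _ in range(roll): px, py, pz = px, -pz, py   (range(roll) runs roll.toNat times)
def pvRollA : Nat → Int × Int × Int → Int × Int × Int
  | 0, p => p
  | n + 1, p => pvRollA n (p.1, -p.2.2, p.2.1)

def apply_rotation (point : Int × Int × Int) (rotation : String × Int) : Int × Int × Int :=
  let x := point.1; let y := point.2.1; let z := point.2.2
  let facing := rotation.1; let roll := rotation.2
  let p0 : Int × Int × Int :=
    if facing == "x" then (x, y, z)
    else if facing == "-x" then (-x, -y, z)
    else if facing == "y" then (y, -x, z)
    else if facing == "-y" then (-y, x, z)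
    else if facing == "z" then (z, y, -x)
    else if facing == "-z" then (-z, y, x)
    else (0, 0, 0)  -- Python raises UnboundLocalError here; excluded by Pre_apply_rotation
  pvRollA roll.toNat p0

-- ===== PORT B =====
def pvM3 : Type := (Int × Int × Int) × (Int × Int × Int) × (Int × Int × Int)

def pvMatvec (m : pvM3) (v : Int × Int × Int) : Int × Int × Int :=
  (m.1.1 * v.1 + m.1.2.1 * v.2.1 + m.1.2.2 * v.2.2,
   m.2.1.1 * v.1 + m.2.1.2.1 * v.2.1 + m.2.1.2.2 * v.2.2,
   m.2.2.1 * v.1 + m.2.2.2.1 * v.2.1 + m.2.2.2.2 * v.2.2)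

def pvFACING : PySem.Dict String pvM3 :=
  PySem.Dict.ofList [("x",  ((1, 0, 0), (0, 1, 0), (0, 0, 1))),
   ("-x", ((-1, 0, 0), (0, -1, 0), (0, 0, 1))),
   ("y",  ((0, 1, 0), (-1, 0, 0), (0, 0, 1))),
   ("-y", ((0, -1, 0), (1, 0, 0), (0, 0, 1))),
   ("z",  ((0, 0, 1), (0, 1, 0), (-1, 0, 0))),
   ("-z", ((0, 0, -1), (0, 1, 0), (1, 0, 0)))]

def pvROLL : pvM3 := ((1, 0, 0), (0, 0, -1), (0, 1, 0))

def pvRollB : Nat → Int × Int × Int → Int × Int × Int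
  | 0, v => v
  | n + 1, v => pvRollB n (pvMatvec pvROLL v)

def apply_rotation_alt (point : Int × Int × Int) (rotation : String × Int) : Int × Int × Int :=
  let facing := rotation.1; let roll := rotation.2
  -- FACING[facing]: KeyError for other strings; excluded by Pre_apply_rotation
  let m := PySem.Dict.getD pvFACING facing ((0, 0, 0), (0, 0, 0), (0, 0, 0))
  pvRollB (PySem.Int.mod (max roll 0) 4).toNat (pvMatvec m point)

-- ===== PRECONDITION & SPEC =====
-- Pre_ excludes facing strings other than the six axis names, on which A raises
-- UnboundLocalError (px/py/pz never assigned) and B raises KeyError.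
def Pre_apply_rotation (point : Int × Int × Int) (rotation : String × Int) : Prop :=
  rotation.1 = "x" ∨ rotation.1 = "-x" ∨ rotation.1 = "y" ∨ rotation.1 = "-y" ∨ rotation.1 = "z" ∨ rotation.1 = "-z"
instance (point : Int × Int × Int) (rotation : String × Int) : Decidable (Pre_apply_rotation point rotation) := by unfold Pre_apply_rotation; infer_instance

def pvWitness_apply_rotation : (Int × Int × Int) × (String × Int) := ((1, 2, 3), ("y", 5))

def Spec_apply_rotation (point : Int × Int × Int) (rotation : String × Int) (out : Int × Int × Int) : Prop := out = apply_rotation_alt point rotation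
instance (point : Int × Int × Int) (rotation : String × Int) (out : Int × Int × Int) : Decidable (Spec_apply_rotation point rotation out) := by unfold Spec_apply_rotation; infer_instance

-- ===== CLAIM (what is proved, stated in full; the proofs are below) =====
def Claim_equal_apply_rotation : Prop := ∀ (point : Int × Int × Int) (rotation : String × Int), Dom_apply_rotation point rotation → Pre_apply_rotation point rotation → Spec_apply_rotation point rotation (apply_rotation point rotation)

-- ===== LEMMAS AND PROOFS =====

-- the roll step has period 4
lemma pvRollA_add4 (n : Nat) (p : Int × Int × Int) : pvRollA (n + 4) p = pvRollA n p := by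
  obtain ⟨x, y, z⟩ := p
  show pvRollA n (x, - -y, - -z) = pvRollA n (x, y, z)
  simp

lemma pvRollA_mul_add (q r : Nat) (p : Int × Int × Int) : pvRollA (4 * q + r) p = pvRollA r p := by
  induction q with
  | zero => simp
  | succ k ih =>
      have : 4 * (k + 1) + r = (4 * k + r) + 4 := by ring
      rw [this, pvRollA_add4, ih]

lemma pvRollA_mod (n : Nat) (p : Int × Int × Int) : pvRollA n p = pvRollA (n % 4) p := by
  conv_lhs => rw [← Nat.div_add_mod n 4]
  exact pvRollA_mul_add _ _ p

lemma pvRollB_eq (n : Nat) (v : Int × Int × Int) : pvRollB n v = pvRollA n v := by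
  induction n generalizing v with
  | zero => rfl
  | succ k ih =>
      show pvRollB k (pvMatvec pvROLL v) = pvRollA k (v.1, -v.2.2, v.2.1)
      rw [ih]
      congr 1
      obtain ⟨a, b, c⟩ := v
      simp [pvMatvec, pvROLL]

lemma pvModeq (roll : Int) : (PySem.Int.mod (max roll 0) 4).toNat = roll.toNat % 4 := by
  rw [PySem.Int.mod_eq_emod_of_pos (show (0:Int) < 4 by norm_num)]
  omega

lemma pvF_x : PySem.Dict.getD pvFACING "x" ((0,0,0),(0,0,0),(0,0,0)) = ((1,0,0),(0,1,0),(0,0,1)) := rfl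
lemma pvF_nx : PySem.Dict.getD pvFACING "-x" ((0,0,0),(0,0,0),(0,0,0)) = ((-1,0,0),(0,-1,0),(0,0,1)) := rfl
lemma pvF_y : PySem.Dict.getD pvFACING "y" ((0,0,0),(0,0,0),(0,0,0)) = ((0,1,0),(-1,0,0),(0,0,1)) := rfl
lemma pvF_ny : PySem.Dict.getD pvFACING "-y" ((0,0,0),(0,0,0),(0,0,0)) = ((0,-1,0),(1,0,0),(0,0,1)) := rfl
lemma pvF_z : PySem.Dict.getD pvFACING "z" ((0,0,0),(0,0,0),(0,0,0)) = ((0,0,1),(0,1,0),(-1,0,0)) := rfl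
lemma pvF_nz : PySem.Dict.getD pvFACING "-z" ((0,0,0),(0,0,0),(0,0,0)) = ((0,0,-1),(0,1,0),(1,0,0)) := rfl

theorem apply_rotation_spec : Claim_equal_apply_rotation := by
  intro point rotation _ hpre
  unfold Spec_apply_rotation
  obtain ⟨x, y, z⟩ := point
  obtain ⟨f, roll⟩ := rotation
  rcases hpre with h | h | h | h | h | h <;> subst h <;>
    simp only [apply_rotation, apply_rotation_alt] <;>
    rw [pvRollB_eq, pvModeq, ← pvRollA_mod] <;>
    norm_num [pvMatvec, pvF_x, pvF_nx, pvF_y, pvF_ny, pvF_z, pvF_nz, beq_iff_eq, String.reduceEq] <;> simp
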